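-- pv_equiv track=rewrite | github.com/Mabtahi1/AI-Lawfirm | services/case_comparison.py | _extract_similar_cases
-- ===== SOURCE A (Python) =====
-- from typing import List, Dict, Any
--
-- def _extract_similar_cases(analysis: str, previous_cases: List[Dict[str, Any]]) -> List[Dict[str, Any]]:
--     """Extract similar cases mentioned in the analysis"""
--     similar = []
--
--     for case in previous_cases:
--         case_id = case.get('id', '')
--         case_title = case.get('title', '')
--
--         # Simple extraction - check if case is mentioned in analysis
--         if case_id in analysis or case_title.lower() in analysis.lower():
--             similar.append({
--                 'case_id': case_id,
--                 'title': case_title,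
--                 'type': case.get('type', 'N/A')
--             })
--
--     return similar
-- ===== SOURCE B (Python) =====
-- def _window_set(s, lengths):
--     """Hash set of every contiguous substring of s whose length occurs in lengths."""
--     ws = set()
--     for k in set(lengths):
--         for i in range(len(s) - k + 1):
--             ws.add(s[i:i + k])
--     return ws
--
--
-- def _extract_similar_cases(analysis, previous_cases):
--     """Extract similar cases via a substring index: all windows of the needed
--     lengths are collected once, then each case check is a set lookup."""
--     lowered = analysis.lower()
--     id_ws = _window_set(analysis, [len(c.get('id', '')) for c in previous_cases])
--     title_ws = _window_set(lowered, [len(c.get('title', '').lower()) for c in previous_cases])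
--     similar = []
--     for case in previous_cases:
--         if case.get('id', '') in id_ws or case.get('title', '').lower() in title_ws:
--             similar.append({
--                 'case_id': case.get('id', ''),
--                 'title': case.get('title', ''),
--                 'type': case.get('type', 'N/A'),
--             })
--     return similar
-- ===== Notes on version B (the rewrite author's own statement) =====
-- stated objective: alternative
-- what changed: B builds a substring index once -- a hash set of every window of the analysis (and of its lowercased form) whose length is one of the id/title lengths -- so each case check becomes an O(1) set lookup instead of A's per-case substring scan of the whole analysis.
import Mathlib
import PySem

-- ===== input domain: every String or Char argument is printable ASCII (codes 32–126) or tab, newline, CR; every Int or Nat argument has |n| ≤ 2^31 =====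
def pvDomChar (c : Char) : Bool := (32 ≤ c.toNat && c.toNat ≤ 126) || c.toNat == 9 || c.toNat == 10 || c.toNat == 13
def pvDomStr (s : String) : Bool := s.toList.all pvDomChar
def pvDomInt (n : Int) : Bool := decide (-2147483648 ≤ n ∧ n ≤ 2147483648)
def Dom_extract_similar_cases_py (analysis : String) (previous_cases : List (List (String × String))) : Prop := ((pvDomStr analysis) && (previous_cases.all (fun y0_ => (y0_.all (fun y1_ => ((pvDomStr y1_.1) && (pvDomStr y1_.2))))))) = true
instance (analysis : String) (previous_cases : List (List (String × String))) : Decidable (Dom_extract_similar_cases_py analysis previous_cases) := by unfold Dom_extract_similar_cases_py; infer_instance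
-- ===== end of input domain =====

-- B replaces A's per-case substring scans by a substring index: it collects all windows of
-- the analysis (and of its lowercased form) whose lengths are the pattern lengths into a set
-- built once, so each case check becomes a set lookup (alternative algorithm, not claimed faster).

-- ===== PORT A =====
def extract_similar_cases_py (analysis : String) (previous_cases : List (List (String × String))) : List (List (String × String)) :=
  previous_cases.foldl (fun similar case_ =>
    let case_id := PySem.Dict.getD (PySem.Dict.mk case_) "id" ""
    let case_title := PySem.Dict.getD (PySem.Dict.mk case_) "title" ""
    if PySem.Str.isIn case_id analysis
        || PySem.Str.isIn (PySem.Str.lower case_title) (PySem.Str.lower analysis) then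
      similar ++ [[("case_id", case_id), ("title", case_title),
                   ("type", PySem.Dict.getD (PySem.Dict.mk case_) "type" "N/A")]]
    else similar) []

-- ===== PORT B =====
-- _window_set: hash set of every contiguous substring of s whose length occurs in lengths
def pvWindowSet (s : String) (lengths : List Int) : PySem.Set String :=
  -- 'for k in set(lengths)': only membership of the resulting set is consumed, so the
  -- unmodelled hash-iteration order of set(lengths) cannot affect any observed value
  (PySem.Set.ofList lengths).foldl (fun ws k =>
    (PySem.List.pyRange 0 (PySem.Str.len s - k + 1)).foldl (fun ws i =>
      PySem.Set.add ws (PySem.Str.slice s (some i) (some (i + k)))) ws) PySem.Set.empty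

def extract_similar_cases_py_alt (analysis : String) (previous_cases : List (List (String × String))) : List (List (String × String)) :=
  let lowered := PySem.Str.lower analysis
  let id_ws := pvWindowSet analysis
    (previous_cases.map (fun c => PySem.Str.len (PySem.Dict.getD (PySem.Dict.mk c) "id" "")))
  let title_ws := pvWindowSet lowered
    (previous_cases.map (fun c => PySem.Str.len (PySem.Str.lower (PySem.Dict.getD (PySem.Dict.mk c) "title" ""))))
  previous_cases.foldl (fun similar case_ =>
    if PySem.Set.contains id_ws (PySem.Dict.getD (PySem.Dict.mk case_) "id" "")
        || PySem.Set.contains title_ws (PySem.Str.lower (PySem.Dict.getD (PySem.Dict.mk case_) "title" "")) then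
      similar ++ [[("case_id", PySem.Dict.getD (PySem.Dict.mk case_) "id" ""),
                   ("title", PySem.Dict.getD (PySem.Dict.mk case_) "title" ""),
                   ("type", PySem.Dict.getD (PySem.Dict.mk case_) "type" "N/A")]]
    else similar) []

-- ===== PRECONDITION & SPEC =====
def Spec_extract_similar_cases_py (analysis : String) (previous_cases : List (List (String × String))) (out : List (List (String × String))) : Prop := out = extract_similar_cases_py_alt analysis previous_cases
instance (analysis : String) (previous_cases : List (List (String × String))) (out : List (List (String × String))) : Decidable (Spec_extract_similar_cases_py analysis previous_cases out) := by unfold Spec_extract_similar_cases_py; infer_instance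

-- ===== CLAIM (what is proved, stated in full; the proofs are below) =====
def Claim_equal_extract_similar_cases_py : Prop := ∀ (analysis : String) (previous_cases : List (List (String × String))), Dom_extract_similar_cases_py analysis previous_cases → Spec_extract_similar_cases_py analysis previous_cases (extract_similar_cases_py analysis previous_cases)

-- ===== LEMMAS AND PROOFS =====

-- membership in a fold of Set.add
theorem pv_mem_foldl_add {α β : Type} [BEq β] [LawfulBEq β] (l : List α) (f : α → β)
    (ws : PySem.Set β) (x : β) :
    x ∈ l.foldl (fun ws i => PySem.Set.add ws (f i)) ws ↔ x ∈ ws ∨ ∃ i ∈ l, x = f i := by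
  induction l generalizing ws with
  | nil => simp
  | cons a t ih => simp [ih, PySem.Set.mem_add]; tauto

-- membership in the window set
theorem pv_mem_windowSet_aux (s : String) (L : List Int) (ws : PySem.Set String) (p : String) :
    p ∈ L.foldl (fun ws k =>
      (PySem.List.pyRange 0 (PySem.Str.len s - k + 1)).foldl (fun ws i =>
        PySem.Set.add ws (PySem.Str.slice s (some i) (some (i + k)))) ws) ws ↔
      p ∈ ws ∨ ∃ k ∈ L, ∃ i, i ∈ PySem.List.pyRange 0 (PySem.Str.len s - k + 1) ∧
        p = PySem.Str.slice s (some i) (some (i + k)) := by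
  induction L generalizing ws with
  | nil => simp
  | cons a t ih => simp only [List.foldl_cons, ih, pv_mem_foldl_add]; simp [or_assoc]

theorem pv_mem_windowSet (s : String) (L : List Int) (p : String) :
    p ∈ pvWindowSet s L ↔
      ∃ k ∈ L, ∃ i, i ∈ PySem.List.pyRange 0 (PySem.Str.len s - k + 1) ∧
        p = PySem.Str.slice s (some i) (some (i + k)) := by
  unfold pvWindowSet
  rw [pv_mem_windowSet_aux]
  simp only [PySem.Set.mem_ofList, PySem.Set.empty]
  simp

-- any slice xs[a:b] is a contiguous piece of xs
theorem pv_slice_infix {α : Type} (xs : List α) (a b : Int) :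
    PySem.List.slice xs (some a) (some b) <:+: xs := by
  simp only [PySem.List.slice]
  exact ((List.take_prefix _ _).isInfix.trans (List.drop_suffix _ _).isInfix)

-- a window-set lookup is exactly Python's 'in' when the pattern's length was indexed
theorem pv_contains_windowSet (s p : String) (L : List Int)
    (h : PySem.Str.len p ∈ L) :
    PySem.Set.contains (pvWindowSet s L) p = PySem.Str.isIn p s := by
  rw [Bool.eq_iff_iff, PySem.Set.contains_iff, PySem.Str.isIn_iff_infix, pv_mem_windowSet]
  constructor
  · rintro ⟨k, -, i, -, rfl⟩
    rw [PySem.Str.toList_slice]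
    exact pv_slice_infix _ _ _
  · rintro ⟨u, v, huv⟩
    refine ⟨PySem.Str.len p, h, (u.length : Int), ?_, ?_⟩
    · rw [PySem.List.mem_pyRange_one, PySem.Str.len_eq, PySem.Str.len_eq]
      have : s.toList.length = u.length + p.toList.length + v.length := by
        rw [← huv]; simp; ring
      omega
    · apply String.toList_inj.mp
      rw [PySem.Str.toList_slice, PySem.Str.len_eq]
      simp only [PySem.Chars.slice]
      rw [PySem.List.slice_natCast_add, ← huv, List.append_assoc, List.drop_left, List.take_left]

-- ===== VERDICT (by name: the statement is the Claim_ definition above) =====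
theorem extract_similar_cases_py_spec : Claim_equal_extract_similar_cases_py := by
  intro analysis previous_cases _
  unfold Spec_extract_similar_cases_py extract_similar_cases_py extract_similar_cases_py_alt
  refine PySem.List.foldl_congr_mem _ _ _ _ ?_
  intro acc c hc
  have h1 := pv_contains_windowSet analysis (PySem.Dict.getD (PySem.Dict.mk c) "id" "")
    (previous_cases.map (fun c => PySem.Str.len (PySem.Dict.getD (PySem.Dict.mk c) "id" "")))
    (List.mem_map_of_mem hc)
  have h2 := pv_contains_windowSet (PySem.Str.lower analysis)
    (PySem.Str.lower (PySem.Dict.getD (PySem.Dict.mk c) "title" ""))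
    (previous_cases.map (fun c => PySem.Str.len (PySem.Str.lower (PySem.Dict.getD (PySem.Dict.mk c) "title" ""))))
    (List.mem_map_of_mem hc)
  simp only [h1, h2]
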